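-- pv_equiv track=rewrite | github.com/Eksity/RandomProjects | Courses/CS50/Learning Python/Problem Sets/Problem Set 5/plates/plates.py | correct_numbers
-- ===== SOURCE A (Python) =====
-- def correct_numbers(d):
--     numlist = []
--     for i in range(len(list(d))):
--         if list(d)[i].isnumeric():
--             numlist.append(list(d)[i])
--             try:
--                 if list(d)[i+1].isnumeric():
--                     continue
--                 else:
--                     return False
--             except:
--                 continue
--         else:
--             continue
--
--     try:
--         if numlist[0] == "0":
--             return False
--         else:
--             return True
--     except:
--         return True
-- ===== SOURCE B (Python) =====
-- def correct_numbers(d):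
--     cs = list(d)
--     i = 0
--     while i < len(cs) and not cs[i].isnumeric():
--         i += 1
--     suffix = cs[i:]
--     if not suffix:
--         return True
--     return all(c.isnumeric() for c in suffix) and suffix[0] != "0"
-- ===== Notes on version B (the rewrite author's own statement) =====
-- stated objective: faster
-- what changed: Replaces A's per-index lookahead scan (which rebuilds list(d) at every step and returns early via try/except) with a two-phase check: drop the leading non-digit prefix, then validate that the remaining suffix is all digits and does not begin with a zero.
import Mathlib
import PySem

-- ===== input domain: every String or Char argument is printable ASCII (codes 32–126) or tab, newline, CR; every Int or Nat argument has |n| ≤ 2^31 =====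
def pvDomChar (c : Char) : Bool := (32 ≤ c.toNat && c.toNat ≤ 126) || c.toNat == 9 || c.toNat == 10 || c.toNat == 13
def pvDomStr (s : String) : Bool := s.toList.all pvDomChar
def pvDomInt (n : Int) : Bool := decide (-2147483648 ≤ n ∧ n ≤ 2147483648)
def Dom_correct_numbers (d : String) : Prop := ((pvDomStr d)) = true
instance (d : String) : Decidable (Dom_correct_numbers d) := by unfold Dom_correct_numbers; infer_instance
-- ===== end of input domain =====

-- B changes A's lookahead scan into a two-phase drop-prefix-then-validate-suffix check (simpler, one pass).
-- On the printable-ASCII domain, str.isnumeric agrees with PySem.Chars.isdigit.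

-- ===== PORT A =====
-- A's loop, step for step: scan chars left to right with one-char lookahead; a digit followed
-- by a non-digit returns False immediately (none); otherwise digits accumulate in numlist.
def correct_numbers_loopA : List Char → List Char → Option (List Char)
  | [], acc => some acc
  | c :: rest, acc =>
    if PySem.Chars.isdigit c then
      match rest with
      | [] => correct_numbers_loopA [] (acc ++ [c])        -- i+1 raises IndexError → except → continue
      | c2 :: r => if PySem.Chars.isdigit c2 then correct_numbers_loopA (c2 :: r) (acc ++ [c]) else none
    else correct_numbers_loopA rest acc

def correct_numbers (d : String) : Bool :=
  match correct_numbers_loopA d.toList [] with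
  | none => false                                          -- early 'return False'
  | some numlist =>
    match numlist with
    | [] => true                                           -- numlist[0] raises → except → True
    | c :: _ => if c = '0' then false else true

-- ===== PORT B =====
def correct_numbers_alt (d : String) : Bool :=
  match (d.toList).dropWhile (fun c => !PySem.Chars.isdigit c) with
  | [] => true
  | c :: rest => ((c :: rest).all PySem.Chars.isdigit) && c != '0'

-- ===== PRECONDITION & SPEC =====
def Spec_correct_numbers (d : String) (out : Bool) : Prop := out = correct_numbers_alt d
instance (d : String) (out : Bool) : Decidable (Spec_correct_numbers d out) := by unfold Spec_correct_numbers; infer_instance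

-- ===== CLAIM (what is proved, stated in full; the proofs are below) =====
def Claim_equal_correct_numbers : Prop := ∀ (d : String), Dom_correct_numbers d → Spec_correct_numbers d (correct_numbers d)

-- ===== LEMMAS AND PROOFS =====

-- A's loop computes: some (acc ++ suffix) when the dropped suffix is all digits, none otherwise.
theorem correct_numbers_loopA_eq (cs acc : List Char) :
    correct_numbers_loopA cs acc =
      (let s := cs.dropWhile (fun c => !PySem.Chars.isdigit c)
       if s.all PySem.Chars.isdigit then some (acc ++ s) else none) := by
  induction cs generalizing acc with
  | nil => simp [correct_numbers_loopA]
  | cons c rest ih =>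
    by_cases hc : PySem.Chars.isdigit c
    · match rest with
      | [] => simp [correct_numbers_loopA, hc, List.dropWhile]
      | c2 :: r =>
        by_cases hc2 : PySem.Chars.isdigit c2
        · rw [show correct_numbers_loopA (c :: c2 :: r) acc
              = correct_numbers_loopA (c2 :: r) (acc ++ [c]) by
            simp [correct_numbers_loopA, hc, hc2]]
          rw [ih]
          simp [List.dropWhile, hc, hc2]
        · simp [correct_numbers_loopA, hc, hc2, List.dropWhile, List.all_cons]
    · rw [show correct_numbers_loopA (c :: rest) acc = correct_numbers_loopA rest acc by
        rw [correct_numbers_loopA.eq_def]; simp [hc]]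
      rw [ih]
      simp only [List.dropWhile_cons, hc, Bool.not_false, if_pos]

-- ===== VERDICT (by name: the statement is the Claim_ definition above) =====
theorem correct_numbers_spec : Claim_equal_correct_numbers := by
  intro d _
  unfold Spec_correct_numbers correct_numbers correct_numbers_alt
  rw [correct_numbers_loopA_eq]
  cases h : (d.toList).dropWhile (fun c => !PySem.Chars.isdigit c) with
  | nil => simp
  | cons c rest =>
    have hc : PySem.Chars.isdigit c := by
      have := List.head_dropWhile_not (p := fun c => !PySem.Chars.isdigit c) (l := d.toList)
        (by simp [h])
      simpa [h] using this
    by_cases hall : (c :: rest).all PySem.Chars.isdigit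
    · simp only [hall, if_pos]
      simp
      by_cases h0 : c = '0' <;> simp [h0]
    · simp [hall]
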